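-- pv_equiv track=rewrite | github.com/Zizuixixiang/cedarstar | bot/reply_citations.py | _collapse_punctuation_only_into_previous
-- ===== SOURCE A (Python) =====
-- import unicodedata
-- from typing import List, Literal, Optional, Set, Tuple
--
-- def _is_punctuation_or_symbol_only_fragment(s: str) -> bool:
--     """strip 后除空白外仅含 Unicode 标点/符号（如引号、括号），无字母数字等正文时视为应并入前一片。"""
--     t = (s or "").strip()
--     if not t:
--         return True
--     for ch in t:
--         if ch.isspace():
--             continue
--         cat = unicodedata.category(ch)
--         if cat[0] not in ("P", "S"):
--             return False
--     return True
--
-- def _collapse_punctuation_only_into_previous(merged: List[str]) -> List[str]: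
--     """将仅标点/符号的切片用换行并入前一片（首片无法并入则保留）。"""
--     out: List[str] = []
--     for cur in merged:
--         if _is_punctuation_or_symbol_only_fragment(cur) and out:
--             out[-1] = out[-1] + "\n" + cur
--         else:
--             out.append(cur)
--     return out
-- ===== SOURCE B (Python) =====
-- import unicodedata
-- from typing import List
--
--
-- def _punct_only(s: str) -> bool:
--     return all(ch.isspace() or unicodedata.category(ch)[0] in ("P", "S")
--                for ch in s.strip())
--
--
-- def _collapse_punctuation_only_into_previous(merged: List[str]) -> List[str]:
--     # two-pointer group scan: each output entry is the join of one maximal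
--     # block merged[i:j] where positions i+1..j-1 are punctuation/symbol-only
--     out: List[str] = []
--     i = 0
--     n = len(merged)
--     while i < n:
--         j = i + 1
--         while j < n and _punct_only(merged[j]):
--             j += 1
--         out.append("\n".join(merged[i:j]))
--         i = j
--     return out
-- ===== Notes on version B (the rewrite author's own statement) =====
-- stated objective: alternative
-- what changed: A walks the list element by element, appending each fragment and merging punctuation-only ones into the last output entry; B is a two-pointer scan over indices: for each group start i it advances j over the following punctuation-only fragments and emits ' '.join(merged[i:j]) in one step, then jumps i to j.
import Mathlib
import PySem

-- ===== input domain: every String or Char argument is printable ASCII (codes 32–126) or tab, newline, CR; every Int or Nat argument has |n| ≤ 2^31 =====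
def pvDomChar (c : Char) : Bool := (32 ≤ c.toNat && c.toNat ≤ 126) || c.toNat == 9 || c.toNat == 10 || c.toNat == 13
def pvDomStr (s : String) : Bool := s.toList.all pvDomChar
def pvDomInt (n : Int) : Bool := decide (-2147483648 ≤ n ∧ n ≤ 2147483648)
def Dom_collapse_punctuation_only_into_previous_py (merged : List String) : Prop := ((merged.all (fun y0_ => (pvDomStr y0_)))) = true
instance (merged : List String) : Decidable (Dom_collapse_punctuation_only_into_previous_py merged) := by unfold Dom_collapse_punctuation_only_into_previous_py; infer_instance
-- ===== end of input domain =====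

-- B replaces A's element-by-element fold (which merges each punctuation-only fragment into
-- the last output entry) by a two-pointer scan that finds each maximal block merged[i:j]
-- and emits its join in one step (objective: alternative).

-- ===== PORT A =====
-- ch.isspace(): exact on the Dom character set (printable ASCII + tab/newline/CR)
def pyIsSpaceChar (c : Char) : Bool :=
  c == ' ' || c == '\t' || c == '\n' || c == '\r' || c.toNat == 11 || c.toNat == 12

-- unicodedata.category(ch)[0] ∈ {"P","S"}: hand port, exact on printable ASCII, where the
-- category starts with P or S exactly for the printable non-space non-alphanumeric characters
def asciiCatPS (c : Char) : Bool :=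
  33 ≤ c.toNat && c.toNat ≤ 126 && !c.isAlphanum

-- the for-loop body of _is_punctuation_or_symbol_only_fragment (continue / return False / return True)
def fragLoopA : List Char → Bool
  | [] => true
  | ch :: rest =>
    if pyIsSpaceChar ch then fragLoopA rest
    else if asciiCatPS ch then fragLoopA rest
    else false

def is_punctuation_or_symbol_only_fragment (s : String) : Bool :=
  let t := PySem.Str.strip s
  if t = "" then true else fragLoopA t.toList

-- the for-loop of _collapse_punctuation_only_into_previous, state = out
def collapseLoopA : List String → List String → List String
  | out, [] => out
  | out, cur :: rest =>
    if is_punctuation_or_symbol_only_fragment cur && !(out == []) then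
      collapseLoopA (out.dropLast ++ [out.getLast! ++ "\n" ++ cur]) rest
    else
      collapseLoopA (out ++ [cur]) rest

def collapse_punctuation_only_into_previous_py (merged : List String) : List String :=
  collapseLoopA [] merged

-- ===== PORT B =====
def punct_only_alt (s : String) : Bool :=
  (PySem.Str.strip s).toList.all (fun ch => pyIsSpaceChar ch || asciiCatPS ch)

-- the inner 'while j < n and _punct_only(merged[j]): j += 1' loop
-- (merged[j] with 0 ≤ j < n is exactly List.getD j)
def scanEndB (merged : List String) (n j : Nat) : Nat :=
  if _h : j < n ∧ punct_only_alt (merged.getD j "") = true then scanEndB merged n (j + 1)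
  else j
termination_by n - j
decreasing_by omega

-- cited by loopB's decreasing_by: the inner loop never moves its pointer backwards
theorem le_scanEndB (merged : List String) (n : Nat) :
    ∀ k j, n - j ≤ k → j ≤ scanEndB merged n j := by
  intro k
  induction k with
  | zero =>
    intro j hj
    rw [scanEndB.eq_def]
    split
    · omega
    · exact Nat.le_refl j
  | succ k ih =>
    intro j hj
    rw [scanEndB.eq_def]
    split
    · next h => exact Nat.le_trans (Nat.le_succ j) (ih (j + 1) (by omega))
    · exact Nat.le_refl j

-- the outer 'while i < n' loop, state = (out, i)
def loopB (merged : List String) (n : Nat) (out : List String) (i : Nat) : List String :=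
  if _h : i < n then
    let j := scanEndB merged n (i + 1)
    loopB merged n
      (out ++ [PySem.Str.join "\n" (PySem.List.slice merged (some (i : Int)) (some (j : Int)))]) j
  else out
termination_by n - i
decreasing_by
  have := le_scanEndB merged n (n - (i + 1)) (i + 1) (Nat.le_refl _)
  omega

def collapse_punctuation_only_into_previous_py_alt (merged : List String) : List String :=
  loopB merged merged.length [] 0

-- ===== PRECONDITION & SPEC =====
def Spec_collapse_punctuation_only_into_previous_py (merged : List String) (out : List String) : Prop := out = collapse_punctuation_only_into_previous_py_alt merged
instance (merged : List String) (out : List String) : Decidable (Spec_collapse_punctuation_only_into_previous_py merged out) := by unfold Spec_collapse_punctuation_only_into_previous_py; infer_instance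

-- ===== CLAIM (what is proved, stated in full; the proofs are below) =====
def Claim_equal_collapse_punctuation_only_into_previous_py : Prop := ∀ (merged : List String), Dom_collapse_punctuation_only_into_previous_py merged → Spec_collapse_punctuation_only_into_previous_py merged (collapse_punctuation_only_into_previous_py merged)

-- ===== LEMMAS AND PROOFS =====

-- proof-only: length of the punctuation-only prefix
def spanLen : List String → Nat
  | [] => 0
  | x :: r => if punct_only_alt x then spanLen r + 1 else 0

-- proof-only: the common group-wise description both programs compute
def altL : List String → List String
  | [] => []
  | x :: r =>
    PySem.Str.join "\n" (x :: r.take (spanLen r)) :: altL (r.drop (spanLen r))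
termination_by l => l.length
decreasing_by simp

theorem altL_nil : altL [] = [] := by rw [altL.eq_def]

theorem altL_cons (x : String) (r : List String) :
    altL (x :: r) = PySem.Str.join "\n" (x :: r.take (spanLen r)) :: altL (r.drop (spanLen r)) := by
  rw [altL.eq_def]

theorem getLast!_concat (out : List String) (a : String) : (out ++ [a]).getLast! = a := by
  induction out with
  | nil => rfl
  | cons b bs ih => simp [List.getLast!]

theorem fragLoopA_eq_all (l : List Char) :
    fragLoopA l = l.all (fun ch => pyIsSpaceChar ch || asciiCatPS ch) := by
  induction l with
  | nil => rfl
  | cons ch rest ih =>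
    simp only [fragLoopA, List.all_cons]
    by_cases hs : pyIsSpaceChar ch = true
    · simp [hs, ih]
    · by_cases hp : asciiCatPS ch = true
      · simp [hs, hp, ih]
      · simp [hs, hp]

theorem pred_eq (s : String) :
    is_punctuation_or_symbol_only_fragment s = punct_only_alt s := by
  unfold is_punctuation_or_symbol_only_fragment punct_only_alt
  by_cases h : PySem.Str.strip s = ""
  · simp [h]
  · simp [h, fragLoopA_eq_all]

theorem join_singleton' (a : String) : PySem.Str.join "\n" [a] = a := by
  simp [PySem.Str.join, PySem.Chars.join_singleton]

theorem join_cons_cons' (a b : String) (t : List String) :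
    PySem.Str.join "\n" (a :: b :: t) = a ++ "\n" ++ PySem.Str.join "\n" (b :: t) := by
  rw [← String.toList_inj]; simp [PySem.Str.join, PySem.Chars.join_cons_cons]

theorem join_glue (a b : String) (t : List String) :
    PySem.Str.join "\n" ((a ++ "\n" ++ b) :: t) = PySem.Str.join "\n" (a :: b :: t) := by
  cases t with
  | nil => rw [join_singleton', join_cons_cons', join_singleton']
  | cons c t =>
    rw [join_cons_cons', join_cons_cons', join_cons_cons' b]
    simp [String.append_assoc]

-- A's loop never touches output entries before the last one
theorem collapseLoopA_prefix (l : List String) :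
    ∀ (out : List String) (a : String),
      collapseLoopA (out ++ [a]) l = out ++ collapseLoopA [a] l := by
  induction l with
  | nil => intro out a; rfl
  | cons cur l ih =>
    intro out a
    simp only [collapseLoopA]
    by_cases hc : is_punctuation_or_symbol_only_fragment cur = true
    · rw [if_pos (by simp [hc]), if_pos (by simp [hc])]
      have e1 : (out ++ [a]).dropLast ++ [(out ++ [a]).getLast! ++ "\n" ++ cur] =
          out ++ [a ++ "\n" ++ cur] := by
        rw [List.dropLast_concat, getLast!_concat]
      have e2 : ([a] : List String).dropLast ++ [([a] : List String).getLast! ++ "\n" ++ cur] =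
          [a ++ "\n" ++ cur] := by simp [List.getLast!]
      rw [e1, e2, ih]
    · rw [if_neg (by simp [hc]), if_neg (by simp [hc])]
      rw [show out ++ [a] ++ [cur] = (out ++ [a]) ++ [cur] from rfl,
        ih (out ++ [a]) cur, ih [a] cur]
      simp

-- A's loop, started with one pending entry, produces the group description
theorem collapseLoopA_one (l : List String) :
    ∀ a, collapseLoopA [a] l =
      PySem.Str.join "\n" (a :: l.take (spanLen l)) :: altL (l.drop (spanLen l)) := by
  induction l with
  | nil => intro a; simp [collapseLoopA, altL_nil, spanLen, join_singleton']
  | cons cur l ih =>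
    intro a
    simp only [collapseLoopA, pred_eq]
    by_cases hc : punct_only_alt cur = true
    · rw [if_pos (by simp [hc])]
      have e : ([a] : List String).dropLast ++ [([a] : List String).getLast! ++ "\n" ++ cur] =
          [a ++ "\n" ++ cur] := by simp [List.getLast!]
      rw [e, ih, join_glue]
      simp [spanLen, hc]
    · rw [if_neg (by simp [hc])]
      rw [show ([a] : List String) ++ [cur] = [a] ++ [cur] from rfl,
        collapseLoopA_prefix l [a] cur, ih cur]
      simp only [spanLen, hc, if_false, Bool.false_eq_true, List.take_zero, List.drop_zero]
      rw [altL_cons, join_singleton']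
      rfl

theorem portA_eq_altL (merged : List String) :
    collapse_punctuation_only_into_previous_py merged = altL merged := by
  cases merged with
  | nil => rw [altL_nil]; rfl
  | cons x rest =>
    unfold collapse_punctuation_only_into_previous_py
    simp only [collapseLoopA]
    rw [if_neg (by simp), List.nil_append, collapseLoopA_one, altL_cons]

-- B's inner scan counts exactly the punctuation-only prefix of the remaining list
theorem scanEndB_eq (merged : List String) :
    ∀ k j, j + k = merged.length →
      scanEndB merged merged.length j = j + spanLen (merged.drop j) := by
  intro k
  induction k with
  | zero =>
    intro j hj
    rw [scanEndB.eq_def]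
    rw [List.drop_of_length_le (by omega)]
    split
    · omega
    · simp [spanLen]
  | succ k ih =>
    intro j hj
    have hjlt : j < merged.length := by omega
    have hdrop : merged.drop j = merged[j] :: merged.drop (j + 1) :=
      List.drop_eq_getElem_cons hjlt
    have hgetD : merged.getD j "" = merged[j] := List.getD_eq_getElem merged "" hjlt
    rw [scanEndB.eq_def, hdrop]
    by_cases hc : punct_only_alt merged[j] = true
    · rw [dif_pos ⟨hjlt, by rw [hgetD]; exact hc⟩, ih (j + 1) (by omega)]
      simp only [spanLen, hc, if_pos]
      omega
    · rw [dif_neg (fun hct => hc (hgetD ▸ hct.2))]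
      simp [spanLen, hc]

-- B's outer loop, from index i, appends the group description of the tail
theorem loopB_eq (merged : List String) :
    ∀ k i out, merged.length ≤ i + k →
      loopB merged merged.length out i = out ++ altL (merged.drop i) := by
  intro k
  induction k with
  | zero =>
    intro i out hik
    rw [loopB.eq_def, dif_neg (by omega), List.drop_of_length_le (by omega)]
    simp [altL_nil]
  | succ k ih =>
    intro i out hik
    by_cases hi : i < merged.length
    · have hscan : scanEndB merged merged.length (i + 1) =
          (i + 1) + spanLen (merged.drop (i + 1)) :=
        scanEndB_eq merged (merged.length - (i + 1)) (i + 1) (by omega)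
      set s := spanLen (merged.drop (i + 1)) with hs
      have hj : scanEndB merged merged.length (i + 1) = i + 1 + s := hscan
      rw [loopB.eq_def, dif_pos hi]
      simp only [hj]
      have hslice : PySem.List.slice merged (some (i : Int)) (some ((i + 1 + s : Nat) : Int)) =
          (merged.drop i).take (i + 1 + s - i) := PySem.List.slice_natCast merged i (i + 1 + s)
      have hdrop : merged.drop i = merged[i] :: merged.drop (i + 1) :=
        List.drop_eq_getElem_cons hi
      have htk : (merged.drop i).take (i + 1 + s - i) =
          merged[i] :: (merged.drop (i + 1)).take s := by
        rw [hdrop, show i + 1 + s - i = s + 1 by omega, List.take_succ_cons]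
      have hrest : (merged.drop (i + 1)).drop s = merged.drop (i + 1 + s) := by
        rw [List.drop_drop]
      rw [ih (i + 1 + s) _ (by omega), List.append_assoc]
      have hsl : PySem.Str.join "\n"
            (PySem.List.slice merged (some (i : Int)) (some ((i + 1 + s : Nat) : Int))) =
          PySem.Str.join "\n" (merged[i] :: (merged.drop (i + 1)).take s) := by
        rw [hslice, htk]
      rw [hsl, hdrop, altL_cons, ← hs, hrest]
      simp
    · rw [loopB.eq_def, dif_neg hi, List.drop_of_length_le (by omega)]
      simp [altL_nil]

theorem portB_eq_altL (merged : List String) :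
    collapse_punctuation_only_into_previous_py_alt merged = altL merged := by
  unfold collapse_punctuation_only_into_previous_py_alt
  rw [loopB_eq merged merged.length 0 [] (by omega)]
  simp

-- ===== VERDICT (by name: the statement is the Claim_ definition above) =====
theorem collapse_punctuation_only_into_previous_py_spec : Claim_equal_collapse_punctuation_only_into_previous_py := by
  intro merged _
  unfold Spec_collapse_punctuation_only_into_previous_py
  rw [portA_eq_altL, portB_eq_altL]
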